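-- pv_equiv track=rewrite | github.com/martinkitukov/ai-sec-filing-analyzer | backend/app/services/document_processor.py | _extract_text_filing_metadata
-- ===== SOURCE A (Python) =====
-- from typing import List, Dict, Optional, Tuple
--
-- def _extract_text_filing_metadata(content: str, url: str) -> Dict[str, str]:
--     """Extract metadata from text format SEC filing."""
--     metadata = {"source_url": url}
--
--     try:
--         # Text format has structured headers
--         lines = content.split('\n')[:50]  # Check first 50 lines
--
--         for line in lines:
--             line = line.strip()
--
--             if line.startswith("COMPANY CONFORMED NAME:"):
--                 metadata["company_name"] = line.split(":", 1)[1].strip()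
--             elif line.startswith("FORM TYPE:"):
--                 metadata["form_type"] = line.split(":", 1)[1].strip()
--             elif line.startswith("FILED AS OF DATE:"):
--                 metadata["filing_date"] = line.split(":", 1)[1].strip()
--             elif line.startswith("PERIOD OF REPORT:"):
--                 metadata["period_end_date"] = line.split(":", 1)[1].strip()
--
--     except Exception:
--         pass
--
--     return metadata
-- ===== SOURCE B (Python) =====
-- def _extract_text_filing_metadata(content: str, url: str) -> dict:
--     """Extract metadata from text format SEC filing (two-phase: index all header fields, then look up the known ones)."""
--     metadata = {"source_url": url}
--
--     # Phase 1: one pass over the first 50 lines building a table of ALL header fields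
--     # (key = text before the first colon, value = stripped text after it; last occurrence wins).
--     headers = {}
--     for line in content.split('\n')[:50]:
--         line = line.strip()
--         if ':' in line:
--             key, value = line.split(':', 1)
--             headers[key] = value.strip()
--
--     # Phase 2: pull out only the known header names, renamed to the output keys.
--     known = {
--         "COMPANY CONFORMED NAME": "company_name",
--         "FORM TYPE": "form_type",
--         "FILED AS OF DATE": "filing_date",
--         "PERIOD OF REPORT": "period_end_date",
--     }
--     for key, value in headers.items():
--         if key in known:
--             metadata[known[key]] = value
--
--     return metadata
-- ===== Notes on version B (the rewrite author's own statement) =====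
-- stated objective: alternative
-- what changed: Replaces the flat if/elif startswith-branch chain with two phases: one pass splits every colon line of the first 50 into a full header table (last occurrence wins), then four known header names are looked up via a rename dict and written into the metadata.
import Mathlib
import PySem

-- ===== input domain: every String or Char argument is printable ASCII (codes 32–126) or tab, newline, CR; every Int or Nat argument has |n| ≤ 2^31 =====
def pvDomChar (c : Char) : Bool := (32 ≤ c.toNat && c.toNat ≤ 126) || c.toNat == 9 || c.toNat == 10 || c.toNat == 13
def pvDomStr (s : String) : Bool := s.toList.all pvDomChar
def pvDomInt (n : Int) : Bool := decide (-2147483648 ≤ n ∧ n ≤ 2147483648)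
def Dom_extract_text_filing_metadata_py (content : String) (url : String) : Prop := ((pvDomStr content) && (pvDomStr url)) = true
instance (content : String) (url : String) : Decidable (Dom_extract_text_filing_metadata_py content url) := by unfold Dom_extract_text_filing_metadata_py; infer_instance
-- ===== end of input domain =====

-- B replaces A's flat startswith if/elif chain by two phases — index every 'key: value'
-- header line of the first 50 into a table, then look the four known names up — same
-- result, same cost (objective: alternative decomposition).

-- ===== PORT A =====
def extract_text_filing_metadata_py (content : String) (url : String) : List (String × String) :=
  let metadata : PySem.Dict String String := PySem.Dict.ofList [("source_url", url)]
  let lines : List String := PySem.List.slice ((PySem.Str.split? content "\n").getD []) none (some 50)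
  (lines.foldl (fun md line0 =>
      let line := PySem.Str.strip line0
      -- 'line.split(":", 1)[1]': the startswith guard guarantees a colon, so index 1 is
      -- always in range and pyGetD's default is never used (the try/except never fires)
      if PySem.Str.startswith line "COMPANY CONFORMED NAME:" then
        md.insert "company_name" (PySem.Str.strip (PySem.List.pyGetD ((PySem.Str.splitMax? line ":" 1).getD []) 1 ""))
      else if PySem.Str.startswith line "FORM TYPE:" then
        md.insert "form_type" (PySem.Str.strip (PySem.List.pyGetD ((PySem.Str.splitMax? line ":" 1).getD []) 1 ""))
      else if PySem.Str.startswith line "FILED AS OF DATE:" then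
        md.insert "filing_date" (PySem.Str.strip (PySem.List.pyGetD ((PySem.Str.splitMax? line ":" 1).getD []) 1 ""))
      else if PySem.Str.startswith line "PERIOD OF REPORT:" then
        md.insert "period_end_date" (PySem.Str.strip (PySem.List.pyGetD ((PySem.Str.splitMax? line ":" 1).getD []) 1 ""))
      else md) metadata).items

-- ===== PORT B =====
-- the 'known' rename table of Source B
def pvKnown : PySem.Dict String String := PySem.Dict.ofList
  [("COMPANY CONFORMED NAME", "company_name"), ("FORM TYPE", "form_type"),
   ("FILED AS OF DATE", "filing_date"), ("PERIOD OF REPORT", "period_end_date")]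

def extract_text_filing_metadata_py_alt (content : String) (url : String) : List (String × String) :=
  let lines : List String := PySem.List.slice ((PySem.Str.split? content "\n").getD []) none (some 50)
  -- phase 1: full header table (last occurrence wins)
  let headers : PySem.Dict String String := lines.foldl (fun h line0 =>
      let line := PySem.Str.strip line0
      if PySem.Str.isIn ":" line then
        -- 'key, value = line.split(":", 1)': the colon guard guarantees exactly two parts
        let parts := (PySem.Str.splitMax? line ":" 1).getD []
        h.insert (PySem.List.pyGetD parts 0 "") (PySem.Str.strip (PySem.List.pyGetD parts 1 ""))
      else h) PySem.Dict.empty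
  -- phase 2: write only the known header names, renamed
  (headers.items.foldl (fun md kv =>
      match pvKnown.get? kv.1 with
      | some outKey => md.insert outKey kv.2
      | none => md) (PySem.Dict.ofList [("source_url", url)])).items

-- ===== PRECONDITION & SPEC =====
def Spec_extract_text_filing_metadata_py (content : String) (url : String) (out : List (String × String)) : Prop := out = extract_text_filing_metadata_py_alt content url
instance (content : String) (url : String) (out : List (String × String)) : Decidable (Spec_extract_text_filing_metadata_py content url out) := by unfold Spec_extract_text_filing_metadata_py; infer_instance

-- ===== CLAIM (what is proved, stated in full; the proofs are below) =====
def Claim_equal_extract_text_filing_metadata_py : Prop := ∀ (content : String) (url : String), Dom_extract_text_filing_metadata_py content url → Spec_extract_text_filing_metadata_py content url (extract_text_filing_metadata_py content url)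

-- ===== LEMMAS AND PROOFS =====

-- proof-side aliases for the two loop bodies and phase 2 (definitionally the ports' lambdas)
def pvStepA (md : PySem.Dict String String) (line0 : String) : PySem.Dict String String :=
  if PySem.Str.startswith (PySem.Str.strip line0) "COMPANY CONFORMED NAME:" then
    md.insert "company_name" (PySem.Str.strip (PySem.List.pyGetD ((PySem.Str.splitMax? (PySem.Str.strip line0) ":" 1).getD []) 1 ""))
  else if PySem.Str.startswith (PySem.Str.strip line0) "FORM TYPE:" then
    md.insert "form_type" (PySem.Str.strip (PySem.List.pyGetD ((PySem.Str.splitMax? (PySem.Str.strip line0) ":" 1).getD []) 1 ""))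
  else if PySem.Str.startswith (PySem.Str.strip line0) "FILED AS OF DATE:" then
    md.insert "filing_date" (PySem.Str.strip (PySem.List.pyGetD ((PySem.Str.splitMax? (PySem.Str.strip line0) ":" 1).getD []) 1 ""))
  else if PySem.Str.startswith (PySem.Str.strip line0) "PERIOD OF REPORT:" then
    md.insert "period_end_date" (PySem.Str.strip (PySem.List.pyGetD ((PySem.Str.splitMax? (PySem.Str.strip line0) ":" 1).getD []) 1 ""))
  else md

def pvStepB (h : PySem.Dict String String) (line0 : String) : PySem.Dict String String :=
  if PySem.Str.isIn ":" (PySem.Str.strip line0) then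
    h.insert (PySem.List.pyGetD ((PySem.Str.splitMax? (PySem.Str.strip line0) ":" 1).getD []) 0 "")
      (PySem.Str.strip (PySem.List.pyGetD ((PySem.Str.splitMax? (PySem.Str.strip line0) ":" 1).getD []) 1 ""))
  else h

def pvStepOut (md : PySem.Dict String String) (kv : String × String) : PySem.Dict String String :=
  match pvKnown.get? kv.1 with
  | some outKey => md.insert outKey kv.2
  | none => md

-- rename-and-filter of an items list through the 'known' table
def pvRFM (l : List (String × String)) : List (String × String) :=
  l.filterMap (fun kv => (pvKnown.get? kv.1).map (fun o => (o, kv.2)))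

-- characterization of lookups in the literal table
lemma pvKnown_get? (k : String) : pvKnown.get? k =
    if k = "COMPANY CONFORMED NAME" then some "company_name"
    else if k = "FORM TYPE" then some "form_type"
    else if k = "FILED AS OF DATE" then some "filing_date"
    else if k = "PERIOD OF REPORT" then some "period_end_date"
    else none := by
  have h : pvKnown = PySem.Dict.mk
    [("COMPANY CONFORMED NAME", "company_name"), ("FORM TYPE", "form_type"),
     ("FILED AS OF DATE", "filing_date"), ("PERIOD OF REPORT", "period_end_date")] := by decide
  rw [h]
  by_cases h1 : k = "COMPANY CONFORMED NAME"
  · subst h1; decide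
  by_cases h2 : k = "FORM TYPE"
  · subst h2; decide
  by_cases h3 : k = "FILED AS OF DATE"
  · subst h3; decide
  by_cases h4 : k = "PERIOD OF REPORT"
  · subst h4; decide
  rw [if_neg h1, if_neg h2, if_neg h3, if_neg h4]
  simp only [PySem.Dict.get?_mk_cons]
  rw [if_neg ?_, if_neg ?_, if_neg ?_, if_neg ?_]
  · rfl
  all_goals simp only [beq_iff_eq]
  · exact fun hh => h4 hh.symm
  · exact fun hh => h3 hh.symm
  · exact fun hh => h2 hh.symm
  · exact fun hh => h1 hh.symm

lemma pvKnown_inj {k₁ k₂ o : String} (h₁ : pvKnown.get? k₁ = some o) (h₂ : pvKnown.get? k₂ = some o) :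
    k₁ = k₂ := by
  rw [pvKnown_get?] at h₁ h₂
  split_ifs at h₁ h₂ <;> simp_all <;> exact absurd (h₁.trans h₂.symm) (by decide)

lemma pvKnown_ne_source {k o : String} (h : pvKnown.get? k = some o) : o ≠ "source_url" := by
  rw [pvKnown_get?] at h
  split_ifs at h <;> simp_all <;> exact fun hh => absurd (h.trans hh) (by decide)

-- splitOnMax.go characterizations (maxsplit 1, single-character separator)
lemma pvGo_zero (c : Char) (fuel : Nat) (l cur : List Char) (acc : List (List Char))
    (hf : 0 < fuel) :
    PySem.Chars.splitOnMax.go [c] fuel 0 l cur acc = acc.reverse ++ [cur.reverse ++ l] := by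
  cases fuel with
  | zero => omega
  | succ n =>
    cases l with
    | nil => simp [PySem.Chars.splitOnMax.go]
    | cons a as => simp [PySem.Chars.splitOnMax.go]

lemma pvGo_one (c : Char) : ∀ (fuel : Nat) (l cur : List Char) (acc : List (List Char)),
    l.length < fuel →
    PySem.Chars.splitOnMax.go [c] fuel 1 l cur acc =
      if c ∈ l then acc.reverse ++ [cur.reverse ++ l.takeWhile (· != c), (l.dropWhile (· != c)).tail]
      else acc.reverse ++ [cur.reverse ++ l] := by
  intro fuel
  induction fuel with
  | zero => intro l cur acc h; omega
  | succ n ih =>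
    intro l cur acc h
    cases l with
    | nil => simp [PySem.Chars.splitOnMax.go]
    | cons a as =>
      by_cases hac : a = c
      · subst hac
        have hpre : List.isPrefixOf [a] (a :: as) = true := by simp [List.isPrefixOf]
        simp only [PySem.Chars.splitOnMax.go]
        rw [if_neg one_ne_zero, if_pos hpre]
        simp only [List.length_cons, List.length_nil, Nat.zero_add, List.drop_succ_cons,
          List.drop_zero]
        rw [pvGo_zero a n as [] (cur.reverse :: acc) (by simp at h; omega)]
        simp
      · have hpre : List.isPrefixOf [c] (a :: as) = false := by
          simp [List.isPrefixOf]
          exact fun hh => absurd hh.symm hac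
        simp only [PySem.Chars.splitOnMax.go]
        rw [if_neg one_ne_zero, if_neg (by simp [hpre])]
        rw [ih as (a :: cur) acc (by simp at h ⊢; omega)]
        have hne : (a != c) = true := by simp [hac]
        by_cases hm : c ∈ as
        · simp [hm, hne, Ne.symm hac]
        · simp [hm, Ne.symm hac]

-- s.split(":", 1) when s contains a colon
lemma pvSplitColon (s : List Char) (hc : ':' ∈ s) :
    PySem.Chars.splitMax? s [':'] 1 =
      some [s.takeWhile (· != ':'), (s.dropWhile (· != ':')).tail] := by
  simp [PySem.Chars.splitMax?, PySem.Chars.splitOnMax]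
  rw [pvGo_one ':' (s.length + 1) s [] [] (by omega)]
  simp [hc]

-- ':' in s
lemma pvIsIn (s : List Char) : PySem.Chars.isIn [':'] s = true ↔ ':' ∈ s := by
  rw [PySem.Chars.isIn_iff_infix]; exact List.singleton_infix_iff ':' s

-- s.startswith(K + ":")  ↔  s has a colon and the text before its first colon is K
lemma pvStartswith (s K : List Char) (hK : ':' ∉ K) :
    PySem.Chars.startswith s (K ++ [':']) = true ↔ ':' ∈ s ∧ s.takeWhile (· != ':') = K := by
  rw [PySem.Chars.startswith_iff]
  constructor
  · rintro ⟨t, rfl⟩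
    rw [List.append_assoc]
    refine ⟨by simp, ?_⟩
    rw [List.takeWhile_append_of_pos ?_]
    · simp
    · intro c hc
      simp only [bne_iff_ne, ne_eq]
      rintro rfl; exact hK hc
  · rintro ⟨hc, hkey⟩
    have hne : s.dropWhile (· != ':') ≠ [] := by
      intro hnil
      have hts : s.takeWhile (· != ':') = s := by
        conv_rhs => rw [← List.takeWhile_append_dropWhile (p := (· != ':')) (l := s)]
        rw [hnil, List.append_nil]
      have hmem : ':' ∈ s.takeWhile (· != ':') := by rw [hts]; exact hc
      have := List.mem_takeWhile_imp hmem
      simp at this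
    obtain ⟨x, xs, hx⟩ := List.exists_cons_of_ne_nil hne
    have hpx := List.head_dropWhile_not (· != ':') hne
    have hx' : x = ':' := by
      have h2 : (List.dropWhile (fun x => x != ':') s).head hne = x := by simp [hx]
      rw [h2] at hpx; simpa using hpx
    refine ⟨xs, ?_⟩
    have hsplit := List.takeWhile_append_dropWhile (p := (· != ':')) (l := s)
    rw [hkey, hx, hx'] at hsplit
    simpa using hsplit

-- pvRFM distributes over an in-place overwrite at a known key
lemma pvRFM_overwrite (l : List (String × String)) (k o v : String) (ho : pvKnown.get? k = some o) :
    pvRFM (l.map (fun p => if p.1 == k then (k, v) else p)) =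
      (pvRFM l).map (fun q => if q.1 == o then (o, v) else q) := by
  induction l with
  | nil => rfl
  | cons p rest ih =>
    simp only [List.map_cons]
    by_cases hpk : p.1 = k
    · rw [if_pos (by simp [hpk])]
      unfold pvRFM
      rw [List.filterMap_cons_some (b := (o, v)) (by simp [ho]),
          List.filterMap_cons_some (b := (o, p.2)) (by simp [hpk, ho])]
      simp only [List.map_cons, if_pos (by simp : ((o, p.2).1 == o) = true)]
      exact congrArg _ ih
    · rw [if_neg (by simp [hpk])]
      cases hop : pvKnown.get? p.1 with
      | none =>
        unfold pvRFM
        rw [List.filterMap_cons_none (by simp [hop]), List.filterMap_cons_none (by simp [hop])]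
        exact ih
      | some o' =>
        have hoo : o' ≠ o := fun hh => hpk (pvKnown_inj (hh ▸ hop) ho)
        unfold pvRFM
        rw [List.filterMap_cons_some (b := (o', p.2)) (by simp [hop]),
            List.filterMap_cons_some (b := (o', p.2)) (by simp [hop])]
        simp only [List.map_cons, if_neg (by simp [hoo] : ¬ (((o', p.2).1 == o) = true))]
        exact congrArg _ ih

-- pvRFM ignores an in-place overwrite at an unknown key
lemma pvRFM_overwrite_none (l : List (String × String)) (k v : String) (ho : pvKnown.get? k = none) :
    pvRFM (l.map (fun p => if p.1 == k then (k, v) else p)) = pvRFM l := by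
  induction l with
  | nil => rfl
  | cons p rest ih =>
    simp only [List.map_cons]
    by_cases hpk : p.1 = k
    · rw [if_pos (by simp [hpk])]
      unfold pvRFM
      rw [List.filterMap_cons_none (by simp [ho]), List.filterMap_cons_none (by simp [hpk, ho])]
      exact ih
    · rw [if_neg (by simp [hpk])]
      cases hop : pvKnown.get? p.1 with
      | none =>
        unfold pvRFM
        rw [List.filterMap_cons_none (by simp [hop]), List.filterMap_cons_none (by simp [hop])]
        exact ih
      | some o' =>
        unfold pvRFM
        rw [List.filterMap_cons_some (b := (o', p.2)) (by simp [hop]),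
            List.filterMap_cons_some (b := (o', p.2)) (by simp [hop])]
        exact congrArg _ ih

-- the seed's key never collides with a renamed key
lemma pvSeedBeq {k o : String} (ho : pvKnown.get? k = some o) :
    (("source_url" : String) == o) = false := by
  simp only [beq_eq_false_iff_ne, ne_eq]
  exact fun hh => pvKnown_ne_source ho hh.symm

-- the invariant relates membership in the two dicts through the rename table
lemma pvContains_iff (url k o : String) (h md : PySem.Dict String String)
    (ho : pvKnown.get? k = some o)
    (hmd : md.items = ("source_url", url) :: pvRFM h.items) :
    md.contains o = h.contains k := by
  simp only [PySem.Dict.contains, hmd, List.any_cons]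
  rw [show ((("source_url", url).1 == o) = false) from pvSeedBeq ho, Bool.false_or,
    Bool.eq_iff_iff]
  simp only [List.any_eq_true, pvRFM, List.mem_filterMap]
  constructor
  · rintro ⟨q, ⟨p, hp, hq⟩, hbeq⟩
    cases hop : pvKnown.get? p.1 with
    | none => rw [hop] at hq; simp at hq
    | some o' =>
      rw [hop] at hq
      simp only [Option.map_some, Option.some.injEq] at hq
      have ho' : o' = o := by
        have : q.1 = o := by simpa using hbeq
        rw [← hq] at this; simpa using this
      exact ⟨p, hp, by simp [pvKnown_inj (ho' ▸ hop) ho]⟩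
  · rintro ⟨p, hp, hbeq⟩
    have hpk : p.1 = k := by simpa using hbeq
    exact ⟨(o, p.2), ⟨p, hp, by rw [hpk, ho]; rfl⟩, by simp⟩

-- one known-key line: both sides insert, the invariant is preserved
lemma pvInsert (url k o v : String) (h md : PySem.Dict String String)
    (ho : pvKnown.get? k = some o)
    (hmd : md.items = ("source_url", url) :: pvRFM h.items) :
    (md.insert o v).items = ("source_url", url) :: pvRFM ((h.insert k v).items) := by
  have hc := pvContains_iff url k o h md ho hmd
  by_cases hk : h.contains k = true
  · rw [PySem.Dict.items_insert_of_contains _ v (by rw [hc]; exact hk),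
        PySem.Dict.items_insert_of_contains _ v hk, hmd]
    simp only [List.map_cons]
    rw [show ((if (("source_url", url).1 == o) = true then (o, v) else ("source_url", url)) =
        ("source_url", url)) from by rw [pvSeedBeq ho]; simp]
    rw [pvRFM_overwrite _ k o v ho]
  · have hk' : h.contains k = false := by simpa using hk
    rw [PySem.Dict.items_insert_of_not_contains _ v (by rw [hc]; exact hk'),
        PySem.Dict.items_insert_of_not_contains _ v hk', hmd]
    unfold pvRFM
    rw [List.filterMap_append]
    simp [ho]

-- one unknown-key line: A skips, B's insert is invisible through the rename table
lemma pvInsert_none (url k v : String) (h md : PySem.Dict String String)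
    (ho : pvKnown.get? k = none)
    (hmd : md.items = ("source_url", url) :: pvRFM h.items) :
    md.items = ("source_url", url) :: pvRFM ((h.insert k v).items) := by
  by_cases hk : h.contains k = true
  · rw [PySem.Dict.items_insert_of_contains _ v hk, pvRFM_overwrite_none _ k v ho]
    exact hmd
  · rw [PySem.Dict.items_insert_of_not_contains _ v (by simpa using hk)]
    unfold pvRFM
    rw [List.filterMap_append]
    simp only [List.filterMap_cons, ho, Option.map_none, List.filterMap_nil, List.append_nil]
    exact hmd

-- one line preserves the invariant
lemma pvStep (url line0 : String) (h md : PySem.Dict String String)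
    (hnd : h.keys.Nodup)
    (hmd : md.items = ("source_url", url) :: pvRFM h.items) :
    (pvStepB h line0).keys.Nodup ∧
      (pvStepA md line0).items = ("source_url", url) :: pvRFM (pvStepB h line0).items := by
  unfold pvStepA pvStepB
  generalize PySem.Str.strip line0 = s
  have hsw : ∀ (K Kc : String), Kc.toList = K.toList ++ [':'] → ':' ∉ K.toList →
      (PySem.Str.startswith s Kc = true ↔
        ':' ∈ s.toList ∧ s.toList.takeWhile (· != ':') = K.toList) := by
    intro K Kc hKc hK
    rw [PySem.Str.startswith_eq, hKc]
    exact pvStartswith s.toList K.toList hK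
  by_cases hc : ':' ∈ s.toList
  · -- a colon: B records the field, A records it iff its name is known
    have hparts : (PySem.Str.splitMax? s ":" 1).getD [] =
        [String.ofList (s.toList.takeWhile (· != ':')),
         String.ofList ((s.toList.dropWhile (· != ':')).tail)] := by
      unfold PySem.Str.splitMax?
      rw [show (":" : String).toList = [':'] from by decide, pvSplitColon s.toList hc]
      rfl
    have hIsIn : PySem.Str.isIn ":" s = true := by
      rw [PySem.Str.isIn_eq, show (":" : String).toList = [':'] from by decide]
      exact (pvIsIn s.toList).mpr hc
    rw [if_pos hIsIn, hparts]
    rw [show PySem.List.pyGetD [String.ofList (s.toList.takeWhile (· != ':')),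
          String.ofList ((s.toList.dropWhile (· != ':')).tail)] (0 : Int) "" =
        String.ofList (s.toList.takeWhile (· != ':')) from by simp [pysem]]
    rw [show PySem.List.pyGetD [String.ofList (s.toList.takeWhile (· != ':')),
          String.ofList ((s.toList.dropWhile (· != ':')).tail)] (1 : Int) "" =
        String.ofList ((s.toList.dropWhile (· != ':')).tail) from by simp [pysem]]
    refine ⟨PySem.Dict.nodup_keys_insert _ _ _ hnd, ?_⟩
    have hkeyeq : ∀ X : String, (String.ofList (s.toList.takeWhile (· != ':')) = X) ↔
        s.toList.takeWhile (· != ':') = X.toList := by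
      intro X
      rw [String.ext_iff, String.toList_ofList]
    by_cases e1 : s.toList.takeWhile (· != ':') = ("COMPANY CONFORMED NAME" : String).toList
    · rw [if_pos ((hsw "COMPANY CONFORMED NAME" "COMPANY CONFORMED NAME:" (by decide)
        (by decide)).mpr ⟨hc, e1⟩)]
      exact pvInsert url _ _ _ h md
        (by rw [pvKnown_get?, if_pos ((hkeyeq _).mpr e1)]) hmd
    rw [if_neg (fun hh => e1 ((hsw "COMPANY CONFORMED NAME" "COMPANY CONFORMED NAME:"
      (by decide) (by decide)).mp hh).2)]
    by_cases e2 : s.toList.takeWhile (· != ':') = ("FORM TYPE" : String).toList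
    · rw [if_pos ((hsw "FORM TYPE" "FORM TYPE:" (by decide) (by decide)).mpr ⟨hc, e2⟩)]
      exact pvInsert url _ _ _ h md
        (by rw [pvKnown_get?, if_neg (fun hh => e1 ((hkeyeq _).mp hh)),
                if_pos ((hkeyeq _).mpr e2)]) hmd
    rw [if_neg (fun hh => e2 ((hsw "FORM TYPE" "FORM TYPE:" (by decide) (by decide)).mp hh).2)]
    by_cases e3 : s.toList.takeWhile (· != ':') = ("FILED AS OF DATE" : String).toList
    · rw [if_pos ((hsw "FILED AS OF DATE" "FILED AS OF DATE:" (by decide) (by decide)).mpr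
        ⟨hc, e3⟩)]
      exact pvInsert url _ _ _ h md
        (by rw [pvKnown_get?, if_neg (fun hh => e1 ((hkeyeq _).mp hh)),
                if_neg (fun hh => e2 ((hkeyeq _).mp hh)), if_pos ((hkeyeq _).mpr e3)]) hmd
    rw [if_neg (fun hh => e3 ((hsw "FILED AS OF DATE" "FILED AS OF DATE:" (by decide)
      (by decide)).mp hh).2)]
    by_cases e4 : s.toList.takeWhile (· != ':') = ("PERIOD OF REPORT" : String).toList
    · rw [if_pos ((hsw "PERIOD OF REPORT" "PERIOD OF REPORT:" (by decide) (by decide)).mpr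
        ⟨hc, e4⟩)]
      exact pvInsert url _ _ _ h md
        (by rw [pvKnown_get?, if_neg (fun hh => e1 ((hkeyeq _).mp hh)),
                if_neg (fun hh => e2 ((hkeyeq _).mp hh)),
                if_neg (fun hh => e3 ((hkeyeq _).mp hh)), if_pos ((hkeyeq _).mpr e4)]) hmd
    rw [if_neg (fun hh => e4 ((hsw "PERIOD OF REPORT" "PERIOD OF REPORT:" (by decide)
      (by decide)).mp hh).2)]
    exact pvInsert_none url _ _ h md
      (by rw [pvKnown_get?, if_neg (fun hh => e1 ((hkeyeq _).mp hh)),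
              if_neg (fun hh => e2 ((hkeyeq _).mp hh)),
              if_neg (fun hh => e3 ((hkeyeq _).mp hh)),
              if_neg (fun hh => e4 ((hkeyeq _).mp hh))]) hmd
  · -- no colon: neither side records anything
    have hIsIn : ¬ (PySem.Str.isIn ":" s = true) := by
      rw [PySem.Str.isIn_eq, show (":" : String).toList = [':'] from by decide]
      exact fun hh => hc ((pvIsIn s.toList).mp hh)
    rw [if_neg hIsIn,
        if_neg (fun hh => hc ((hsw "COMPANY CONFORMED NAME" "COMPANY CONFORMED NAME:"
          (by decide) (by decide)).mp hh).1),
        if_neg (fun hh => hc ((hsw "FORM TYPE" "FORM TYPE:" (by decide) (by decide)).mp hh).1),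
        if_neg (fun hh => hc ((hsw "FILED AS OF DATE" "FILED AS OF DATE:" (by decide)
          (by decide)).mp hh).1),
        if_neg (fun hh => hc ((hsw "PERIOD OF REPORT" "PERIOD OF REPORT:" (by decide)
          (by decide)).mp hh).1)]
    exact ⟨hnd, hmd⟩

-- the whole first phase preserves the invariant
set_option maxHeartbeats 1000000 in
lemma pvFold (lines : List String) (url : String) :
    ∀ (h md : PySem.Dict String String), h.keys.Nodup →
      md.items = ("source_url", url) :: pvRFM h.items →
      (lines.foldl pvStepB h).keys.Nodup ∧
        (lines.foldl pvStepA md).items = ("source_url", url) :: pvRFM (lines.foldl pvStepB h).items := by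
  induction lines with
  | nil => exact fun h md hnd hmd => ⟨hnd, hmd⟩
  | cons line rest ih =>
    intro h md hnd hmd
    obtain ⟨hnd', hmd'⟩ := pvStep url line h md hnd hmd
    exact ih (pvStepB h line) (pvStepA md line) hnd' hmd'

-- phase 2 over a fresh-keyed items list appends exactly the renamed known entries
lemma pvPhase2 (l : List (String × String)) : ∀ (md : PySem.Dict String String),
    (∀ p ∈ l, ∀ o, pvKnown.get? p.1 = some o → md.contains o = false) →
    (l.map Prod.fst).Nodup →
    (l.foldl pvStepOut md).items = md.items ++ pvRFM l := by
  induction l with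
  | nil => intro md _ _; simp [pvRFM]
  | cons p rest ih =>
    intro md hfresh hnd
    simp only [List.map_cons, List.nodup_cons] at hnd
    simp only [List.foldl_cons]
    cases hp : pvKnown.get? p.1 with
    | none =>
      rw [show pvStepOut md p = md from by simp [pvStepOut, hp]]
      rw [ih md (fun q hq o ho => hfresh q (List.mem_cons_of_mem _ hq) o ho) hnd.2]
      unfold pvRFM
      rw [List.filterMap_cons_none (by simp [hp])]
    | some o =>
      have hfr : md.contains o = false := hfresh p List.mem_cons_self o hp
      rw [show pvStepOut md p = md.insert o p.2 from by simp [pvStepOut, hp]]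
      rw [ih (md.insert o p.2) ?_ hnd.2]
      · rw [PySem.Dict.items_insert_of_not_contains _ _ hfr]
        unfold pvRFM
        rw [List.filterMap_cons_some (b := (o, p.2)) (by simp [hp])]
        simp
      · intro q hq o' ho'
        rw [PySem.Dict.contains_insert]
        have h1 : md.contains o' = false := hfresh q (List.mem_cons_of_mem _ hq) o' ho'
        have hq1 : q.1 ≠ p.1 := by
          intro hh
          exact hnd.1 (hh ▸ List.mem_map_of_mem hq)
        have h2 : o' ≠ o := fun hh => hq1 (pvKnown_inj ho' (hh ▸ hp))
        simp [h1, h2]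

-- both ports, as folds of the aliases, agree for every list of lines
lemma pvMain (lines : List String) (url : String) :
    (lines.foldl pvStepA (PySem.Dict.ofList [("source_url", url)])).items =
      (((lines.foldl pvStepB PySem.Dict.empty).items).foldl pvStepOut
        (PySem.Dict.ofList [("source_url", url)])).items := by
  have hseed : (PySem.Dict.ofList [("source_url", url)]).items = [("source_url", url)] := by
    simp [PySem.Dict.ofList, PySem.Dict.update, PySem.Dict.empty, PySem.Dict.insert,
      PySem.Dict.contains]
  obtain ⟨hnd, hitems⟩ := pvFold lines url PySem.Dict.empty
    (PySem.Dict.ofList [("source_url", url)]) PySem.Dict.nodup_keys_empty (by rw [hseed]; rfl)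
  have hfr : ∀ p ∈ (lines.foldl pvStepB PySem.Dict.empty).items, ∀ o,
      pvKnown.get? p.1 = some o → (PySem.Dict.ofList [("source_url", url)]).contains o = false := by
    intro p _ o ho
    simp only [PySem.Dict.contains, hseed, List.any_cons, List.any_nil, Bool.or_false]
    exact pvSeedBeq ho
  rw [hitems,
    pvPhase2 (lines.foldl pvStepB PySem.Dict.empty).items
      (PySem.Dict.ofList [("source_url", url)]) hfr hnd, hseed]
  rfl

-- ===== VERDICT (by name: the statement is the Claim_ definition above) =====
set_option maxHeartbeats 1000000 in
theorem extract_text_filing_metadata_py_spec : Claim_equal_extract_text_filing_metadata_py := by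
  intro content url _
  show extract_text_filing_metadata_py content url = extract_text_filing_metadata_py_alt content url
  exact pvMain (PySem.List.slice ((PySem.Str.split? content "\n").getD []) none (some 50)) url
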